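/- GENERATED by mk_final_copies.py from the proof of the farm's unit `start_decoder.7` (farm:start_decoder.7.2: Proof.lean) as the
   re-elaboration sweep compiled it — do not edit. -/
import Asan.CheckWalk
import Vorbis.Spec.Units.start_decoder_7
import Vorbis.Spec.Worked.start_decoder_7_Lemmas

/-!
  Unit `start_decoder.7` (0x11400e … 0x114122: the comment loop of C line 3695 with its byte loop 3700, FIX 1's stub).
  The walks live in `Lemmas.lean`, one lemma per sub-segment between the unit's own cut points:
  `segA` (0x11409e … the return of `get32_packet`), `segB` (… the return of `setup_malloc`, both arms of its post),
  `segC` (the store of `comment_list[i]`, the NULL test), `segD` / `segE` (one round of the byte loop), composed by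
  `compose7` (two uses of `ReachVia.loop`) into `seg7 : StartDecoder.Seg7 Lay μ u₀`.
-/

open X86 X86.User Asan Vorbis

namespace Vorbis.Spec.start_decoder_7

end Vorbis.Spec.start_decoder_7

/-- Segment 7 of `start_decoder` takes its entry assertion (`At7`) to `At8` or `AtERR`, given the contracts of its callees. -/
theorem Vorbis.Spec.Worked.start_decoder_7_ok : Vorbis.Spec.start_decoder_7.Statement := by
  unfold Vorbis.Spec.start_decoder_7.Statement
  intro Lay hLay μ hμ u₀ hcode h_error h_get8_packet h_load8 h_store1 h_load4 h_get32_packet h_setup_malloc h_store8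
  exact Vorbis.Spec.start_decoder_7.seg7 hLay hμ hcode h_error h_get8_packet h_load8 h_store1 h_load4 h_get32_packet
    h_setup_malloc h_store8
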